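-- pv_equiv track=rewrite | github.com/tarannum-2002/weird-o | scripts/script4.py | dna_to_binary
-- ===== SOURCE A (Python) =====
-- def dna_to_binary(dna_sequence):
--     # Define DNA to binary mapping
--     dna_to_binary_map = {"A": "00", "T": "01", "C": "10", "G": "11"}
--     binary_data = []
--
--     # Split the DNA sequence into chunks of 2 bases (representing 2 binary bits)
--     for base in dna_sequence:
--         if base in dna_to_binary_map:
--             binary_data.append(dna_to_binary_map[base])
--
--     # Join binary data into a single string and split it into 8-bit segments (bytes)
--     binary_string = "".join(binary_data)
--     binary_values = [binary_string[i:i+8] for i in range(0, len(binary_string), 8)]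
--
--     return binary_values
-- ===== SOURCE B (Python) =====
-- def dna_to_binary(dna_sequence):
--     codes = {"A": "00", "T": "01", "C": "10", "G": "11"}
--     result = []
--     buf = ""
--     for base in dna_sequence:
--         code = codes.get(base)
--         if code is None:
--             continue
--         buf += code
--         if len(buf) >= 8:
--             result.append(buf[:8])
--             buf = buf[8:]
--     if buf:
--         result.append(buf)
--     return result
-- ===== Notes on version B (the rewrite author's own statement) =====
-- stated objective: alternative
-- what changed: Instead of materialising the full joined bit-string and then slicing it into 8-bit pieces with a range/stride comprehension, B streams: one pass keeps a small bit-buffer, emits a byte chunk as soon as 8 bits are buffered, and flushes the trailing partial chunk at the end, so no intermediate whole-sequence string is ever built.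
import Mathlib
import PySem

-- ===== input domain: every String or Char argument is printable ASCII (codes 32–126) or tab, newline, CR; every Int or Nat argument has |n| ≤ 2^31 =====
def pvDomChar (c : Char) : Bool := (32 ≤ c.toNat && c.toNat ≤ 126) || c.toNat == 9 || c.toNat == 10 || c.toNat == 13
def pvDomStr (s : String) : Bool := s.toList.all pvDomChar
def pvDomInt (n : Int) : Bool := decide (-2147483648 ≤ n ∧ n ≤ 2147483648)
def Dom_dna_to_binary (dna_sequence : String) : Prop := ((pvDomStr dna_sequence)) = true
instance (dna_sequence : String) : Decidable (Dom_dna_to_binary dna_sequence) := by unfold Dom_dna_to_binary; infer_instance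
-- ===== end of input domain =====

-- B replaces A's join-then-slice (build the whole bit-string, then slice by a stride-8 range)
-- with a streaming pass keeping a small bit buffer that flushes an 8-bit chunk as soon as it fills;
-- objective: alternative decomposition, same O(n) cost.

-- ===== PORT A =====
def pvDnaMapA : PySem.Dict String String :=
  PySem.Dict.ofList [("A", "00"), ("T", "01"), ("C", "10"), ("G", "11")]

def dna_to_binary (dna_sequence : String) : List String :=
  let binary_data : List String :=
    dna_sequence.toList.foldl
      (fun acc base =>
        if pvDnaMapA.contains (String.ofList [base]) then
          -- dict lookup guarded by the membership test, so getD's default is never used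
          acc ++ [pvDnaMapA.getD (String.ofList [base]) ""]
        else acc) []
  let binary_string : String := PySem.Str.join "" binary_data
  (PySem.List.pyRange 0 (PySem.Str.len binary_string) 8).map
    (fun i => PySem.Str.slice binary_string (some i) (some (i + 8)))

-- ===== PORT B =====
def pvDnaMapB : PySem.Dict String String :=
  PySem.Dict.ofList [("A", "00"), ("T", "01"), ("C", "10"), ("G", "11")]

def pvStepB (st : List String × String) (base : Char) : List String × String :=
  match pvDnaMapB.get? (String.ofList [base]) with
  | none => st
  | some code =>
    let buf := st.2 ++ code
    if 8 ≤ PySem.Str.len buf then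
      (st.1 ++ [PySem.Str.slice buf none (some 8)], PySem.Str.slice buf (some 8) none)
    else (st.1, buf)

def dna_to_binary_alt (dna_sequence : String) : List String :=
  let r := dna_sequence.toList.foldl pvStepB ([], "")
  if r.2 = "" then r.1 else r.1 ++ [r.2]

-- ===== PRECONDITION & SPEC =====
def Spec_dna_to_binary (dna_sequence : String) (out : List String) : Prop := out = dna_to_binary_alt dna_sequence
instance (dna_sequence : String) (out : List String) : Decidable (Spec_dna_to_binary dna_sequence out) := by unfold Spec_dna_to_binary; infer_instance

-- ===== CLAIM (what is proved, stated in full; the proofs are below) =====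
def Claim_equal_dna_to_binary : Prop := ∀ (dna_sequence : String), Dom_dna_to_binary dna_sequence → Spec_dna_to_binary dna_sequence (dna_to_binary dna_sequence)

-- ===== LEMMAS AND PROOFS =====

-- the per-base two-bit code, as a plain function
def codeS (c : Char) : Option String :=
  if c = 'A' then some "00" else if c = 'T' then some "01"
  else if c = 'C' then some "10" else if c = 'G' then some "11" else none

-- the full bit stream of a char list
def pvCodes (cs : List Char) : List Char :=
  ((cs.filterMap codeS).map String.toList).flatten

-- greedy chunking into pieces of 8 (last piece possibly short)
def chunks8 (bs : List Char) : List (List Char) :=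
  if bs = [] then [] else bs.take 8 :: chunks8 (bs.drop 8)
termination_by bs.length
decreasing_by
  have : 0 < bs.length := List.length_pos_iff.mpr (by assumption)
  simp [List.length_drop]; omega

-- the complete 8-chunks, and the (possibly empty) remainder
def full8 (bs : List Char) : List (List Char) :=
  if 8 ≤ bs.length then bs.take 8 :: full8 (bs.drop 8) else []
termination_by bs.length
decreasing_by simp [List.length_drop]; omega

def rest8 (bs : List Char) : List Char :=
  if 8 ≤ bs.length then rest8 (bs.drop 8) else bs
termination_by bs.length
decreasing_by simp [List.length_drop]; omega

lemma mapA_mk : pvDnaMapA = ⟨[("A", "00"), ("T", "01"), ("C", "10"), ("G", "11")]⟩ := by decide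

lemma mapB_eq_mapA : pvDnaMapB = pvDnaMapA := rfl

lemma ofList_singleton_ne (c a : Char) (h : c ≠ a) : (String.ofList [a] == String.ofList [c]) = false := by
  rw [beq_eq_false_iff_ne]
  intro hEq
  have := congrArg String.toList hEq
  simp only [String.toList_ofList] at this
  exact h (by injection this with h1 _; exact h1.symm)

lemma get_code (c : Char) : pvDnaMapA.get? (String.ofList [c]) = codeS c := by
  rw [mapA_mk]
  by_cases hA : c = 'A'
  · subst hA; decide
  by_cases hT : c = 'T'
  · subst hT; decide
  by_cases hC : c = 'C'
  · subst hC; decide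
  by_cases hG : c = 'G'
  · subst hG; decide
  have nA := ofList_singleton_ne c 'A' hA
  have nT := ofList_singleton_ne c 'T' hT
  have nC := ofList_singleton_ne c 'C' hC
  have nG := ofList_singleton_ne c 'G' hG
  simp only [show ("A" : String) = String.ofList ['A'] from rfl,
    show ("T" : String) = String.ofList ['T'] from rfl,
    show ("C" : String) = String.ofList ['C'] from rfl,
    show ("G" : String) = String.ofList ['G'] from rfl] at *
  rw [PySem.Dict.get?_mk_cons, PySem.Dict.get?_mk_cons, PySem.Dict.get?_mk_cons,
      PySem.Dict.get?_mk_cons, nA, nT, nC, nG]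
  simp only [if_neg Bool.false_ne_true]
  rw [show (PySem.Dict.mk ([] : List (String × String))) = PySem.Dict.empty from rfl,
      PySem.Dict.get?_empty, codeS, if_neg hA, if_neg hT, if_neg hC, if_neg hG]

lemma contains_code (c : Char) : pvDnaMapA.contains (String.ofList [c]) = (codeS c).isSome := by
  rw [PySem.Dict.contains_eq_isSome_get?, get_code]

lemma getD_code (c : Char) (s : String) (h : codeS c = some s) :
    pvDnaMapA.getD (String.ofList [c]) "" = s := by
  rw [PySem.Dict.getD_eq_get?_getD, get_code, h]; rfl

lemma codeS_len (c : Char) (s : String) (h : codeS c = some s) : s.toList.length = 2 := by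
  unfold codeS at h
  split_ifs at h <;> (cases h; decide)

-- A's filter/map loop is exactly filterMap codeS
lemma data_eq (cs : List Char) :
    ((cs.filter (fun c => pvDnaMapA.contains (String.ofList [c]))).map
      (fun c => pvDnaMapA.getD (String.ofList [c]) "")) = cs.filterMap codeS := by
  rw [show (fun c => pvDnaMapA.contains (String.ofList [c])) = (fun c => (codeS c).isSome) from
    funext contains_code]
  induction cs with
  | nil => rfl
  | cons c cs ih =>
    cases h : codeS c with
    | none => simp [h, ih]
    | some s => simp [h, ih, getD_code c s h]

lemma join_empty_flatten (parts : List (List Char)) :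
    PySem.Chars.join [] parts = parts.flatten := by
  induction parts with
  | nil => simp [PySem.Chars.join_nil]
  | cons p rest ih =>
    cases rest with
    | nil => simp [PySem.Chars.join_singleton]
    | cons q r => rw [PySem.Chars.join_cons_cons]; simp only [List.flatten_cons] at *; simp [ih]

lemma pr8 (n : Nat) :
    PySem.List.pyRange 0 (n : Int) 8 = (List.range ((n + 7) / 8)).map (fun k => ((8 * k : Nat) : Int)) := by
  rw [PySem.List.pyRange_of_pos _ _ (by norm_num)]
  have hc : (if (0 : Int) < (n : Int) then (((n : Int) - 0 + 8 - 1) / 8).toNat else 0) = (n + 7) / 8 := by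
    split_ifs with h <;> omega
  rw [hc]
  exact List.map_congr_left (fun k _ => by push_cast; ring)

lemma slice_chunk (S : String) (k : Nat) :
    PySem.Str.slice S (some ((8 * k : Nat) : Int)) (some (((8 * k : Nat) : Int) + 8)) =
      String.ofList ((S.toList.drop (8 * k)).take 8) := by
  apply String.ext
  rw [PySem.Str.toList_slice, String.toList_ofList, PySem.Chars.slice_eq_listSlice,
      show ((8 : Int)) = ((8 : Nat) : Int) from rfl, PySem.List.slice_natCast_add]

lemma chunks_map (bs : List Char) :
    (List.range ((bs.length + 7) / 8)).map (fun k => (bs.drop (8 * k)).take 8) = chunks8 bs := by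
  induction bs using chunks8.induct with
  | case2 bs hne ih =>
    have hl : 0 < bs.length := List.length_pos_iff.mpr hne
    simp only [List.length_drop] at ih
    have hc : (bs.length + 7) / 8 = (bs.length - 8 + 7) / 8 + 1 := by omega
    rw [hc, List.range_succ_eq_map, List.map_cons, List.map_map]
    rw [chunks8, if_neg hne]
    congr 1
    rw [← ih]
    exact List.map_congr_left (fun k _ => by
      simp only [Function.comp_apply, List.drop_drop, Nat.succ_eq_add_one]
      congr 2
      omega)
  | case1 => simp [chunks8]

lemma A_eq (s : String) :
    dna_to_binary s = (chunks8 (pvCodes s.toList)).map String.ofList := by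
  unfold dna_to_binary
  rw [PySem.List.foldl_append_if (fun c => pvDnaMapA.contains (String.ofList [c]))
        (fun c => pvDnaMapA.getD (String.ofList [c]) "") s.toList []]
  simp only [List.nil_append, data_eq]
  have hS : (PySem.Str.join "" ((s.toList.filterMap codeS))).toList = pvCodes s.toList := by
    rw [PySem.Str.toList_join, show ("" : String).toList = [] from rfl, join_empty_flatten]; rfl
  rw [PySem.Str.len_eq, hS, pr8, List.map_map]
  rw [show ((fun i => PySem.Str.slice (PySem.Str.join "" (s.toList.filterMap codeS)) (some i) (some (i + 8))) ∘
        (fun k : Nat => ((8 * k : Nat) : Int))) =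
      (fun k : Nat => String.ofList (((pvCodes s.toList).drop (8 * k)).take 8)) from
    funext (fun k => by
      simp only [Function.comp_apply]
      rw [slice_chunk]
      congr 1
      rw [hS])]
  rw [← chunks_map, List.map_map]
  rfl

lemma full8_pos {bs : List Char} (h : 8 ≤ bs.length) :
    full8 bs = bs.take 8 :: full8 (bs.drop 8) := by rw [full8, if_pos h]

lemma full8_neg {bs : List Char} (h : ¬ 8 ≤ bs.length) : full8 bs = [] := by rw [full8, if_neg h]

lemma rest8_pos {bs : List Char} (h : 8 ≤ bs.length) : rest8 bs = rest8 (bs.drop 8) := by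
  rw [rest8, if_pos h]

lemma rest8_neg {bs : List Char} (h : ¬ 8 ≤ bs.length) : rest8 bs = bs := by rw [rest8, if_neg h]

lemma B_inv (cs : List Char) (out : List String) (buf : String) (hb : buf.toList.length < 8) :
    cs.foldl pvStepB (out, buf) =
      (out ++ (full8 (buf.toList ++ pvCodes cs)).map String.ofList,
       String.ofList (rest8 (buf.toList ++ pvCodes cs))) := by
  induction cs generalizing out buf with
  | nil =>
    simp only [List.foldl_nil, pvCodes, List.filterMap_nil, List.map_nil, List.flatten_nil,
      List.append_nil]
    rw [full8_neg (by omega), rest8_neg (by omega)]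
    simp
  | cons c cs ih =>
    rw [List.foldl_cons]
    have hcodes : pvCodes (c :: cs) = ((codeS c).map String.toList).getD [] ++ pvCodes cs := by
      cases h : codeS c <;> simp [pvCodes, h]
    cases h : codeS c with
    | none =>
      have hstep : pvStepB (out, buf) c = (out, buf) := by
        unfold pvStepB; rw [mapB_eq_mapA, get_code, h]
      rw [hstep, hcodes, h, ih out buf hb]
      simp
    | some code =>
      have hlen2 : code.toList.length = 2 := codeS_len c code h
      have hlenbuf : (buf ++ code).toList.length = buf.toList.length + 2 := by
        rw [String.toList_append, List.length_append, hlen2]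
      have hstep : pvStepB (out, buf) c =
          if 8 ≤ PySem.Str.len (buf ++ code) then
            (out ++ [PySem.Str.slice (buf ++ code) none (some 8)],
             PySem.Str.slice (buf ++ code) (some 8) none)
          else (out, buf ++ code) := by
        unfold pvStepB; rw [mapB_eq_mapA, get_code, h]
      have hlenI : PySem.Str.len (buf ++ code) = ((buf.toList.length + 2 : Nat) : Int) := by
        rw [PySem.Str.len_eq, hlenbuf]
      by_cases h8 : 8 ≤ buf.toList.length + 2
      · rw [hstep, if_pos (by rw [hlenI]; exact_mod_cast h8)]
        have hsliceL : PySem.Str.slice (buf ++ code) none (some 8) =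
            String.ofList ((buf.toList ++ code.toList).take 8) := by
          apply String.ext
          rw [PySem.Str.toList_slice, String.toList_ofList, PySem.Chars.slice_eq_listSlice,
              PySem.List.slice_to _ (by norm_num), String.toList_append]
          rfl
        have hsliceR : PySem.Str.slice (buf ++ code) (some 8) none =
            String.ofList ((buf.toList ++ code.toList).drop 8) := by
          apply String.ext
          rw [PySem.Str.toList_slice, String.toList_ofList, PySem.Chars.slice_eq_listSlice,
              PySem.List.slice_from _ (by norm_num), String.toList_append]
          rfl
        have hrlen : (String.ofList ((buf.toList ++ code.toList).drop 8)).toList.length < 8 := by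
          rw [String.toList_ofList, List.length_drop, List.length_append, hlen2]
          omega
        rw [hsliceL, hsliceR, ih _ _ hrlen]
        have hble : 8 ≤ (buf.toList ++ code.toList).length := by
          rw [List.length_append, hlen2]; omega
        have hfull : full8 ((buf.toList ++ code.toList) ++ pvCodes cs) =
            (buf.toList ++ code.toList).take 8 ::
              full8 ((buf.toList ++ code.toList).drop 8 ++ pvCodes cs) := by
          rw [full8_pos (by rw [List.length_append]; omega),
              List.take_append_of_le_length hble, List.drop_append_of_le_length hble]
        have hrest : rest8 ((buf.toList ++ code.toList) ++ pvCodes cs) =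
            rest8 ((buf.toList ++ code.toList).drop 8 ++ pvCodes cs) := by
          rw [rest8_pos (by rw [List.length_append]; omega),
              List.drop_append_of_le_length hble]
        rw [hcodes, h, String.toList_ofList]
        simp only [Option.map_some, Option.getD_some, ← List.append_assoc]
        rw [hfull, hrest]
        simp
      · rw [hstep, if_neg (by rw [hlenI]; exact_mod_cast h8)]
        rw [ih out (buf ++ code) (by omega)]
        rw [hcodes, h]
        simp only [Option.map_some, Option.getD_some, String.toList_append, List.append_assoc]

lemma ofList_eq_empty_iff (l : List Char) : (String.ofList l = "") ↔ l = [] := by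
  constructor
  · intro h
    have := congrArg String.toList h
    simpa using this
  · intro h; subst h; rfl

lemma B_eq (s : String) :
    dna_to_binary_alt s =
      (full8 (pvCodes s.toList)).map String.ofList ++
        (if rest8 (pvCodes s.toList) = [] then [] else [String.ofList (rest8 (pvCodes s.toList))]) := by
  unfold dna_to_binary_alt
  rw [B_inv s.toList [] "" (by simp)]
  simp only [show ("" : String).toList = [] from rfl, List.nil_append]
  by_cases h : rest8 (pvCodes s.toList) = []
  · rw [if_pos ((ofList_eq_empty_iff _).mpr h), if_pos h, List.append_nil]
  · rw [if_neg (fun hc => h ((ofList_eq_empty_iff _).mp hc)), if_neg h]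

lemma chunks_split (bs : List Char) :
    chunks8 bs = full8 bs ++ (if rest8 bs = [] then [] else [rest8 bs]) := by
  induction bs using full8.induct with
  | case1 bs h8 ih =>
    have hne : bs ≠ [] := by intro h; subst h; simp at h8
    rw [chunks8, if_neg hne, full8_pos h8, rest8_pos h8, List.cons_append, ih]
  | case2 bs h8 =>
    rw [full8_neg h8, rest8_neg h8, List.nil_append, chunks8]
    split_ifs with h
    · rfl
    · rw [List.take_of_length_le (by omega), List.drop_eq_nil_of_le (by omega), chunks8]
      simp

-- ===== VERDICT (by name: the statement is the Claim_ definition above) =====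
theorem dna_to_binary_spec : Claim_equal_dna_to_binary := by
  intro s _
  unfold Spec_dna_to_binary
  rw [A_eq, B_eq, chunks_split, List.map_append]
  congr 1
  split_ifs with h
  · rfl
  · rfl
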